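-- pv_equiv track=rewrite | github.com/FeinardSlim/FPKB | heuristic.py | holesboard
-- ===== SOURCE A (Python) =====
-- def block(cell):
-- 	return cell != 0
--
-- def empty(cell):
-- 	return cell == 0
--
-- def holesboard(board):
-- 	holes = []
-- 	block_in_col = False
-- 	for x in range(len(board[0])):
-- 		for y in range(len(board)):
-- 			if block_in_col and empty(board[y][x]):
-- 				holes.append((x,y))
-- 			elif block(board[y][x]):
-- 				block_in_col = True
-- 		block_in_col = False
-- 	return holes
-- ===== SOURCE B (Python) =====
-- def holesboard(board):
--     holes = []
--     for x in range(len(board[0])):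
--         idx = next((y for y in range(len(board)) if board[y][x] != 0), None)
--         if idx is not None:
--             for y in range(idx + 1, len(board)):
--                 if board[y][x] == 0:
--                     holes.append((x, y))
--     return holes
-- ===== Notes on version B (the rewrite author's own statement) =====
-- stated objective: alternative
-- what changed: Replaces A's running block_in_col boolean with a two-phase per-column scan: first locate the topmost blocked row with next(), then collect empty cells strictly below it.
import Mathlib
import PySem

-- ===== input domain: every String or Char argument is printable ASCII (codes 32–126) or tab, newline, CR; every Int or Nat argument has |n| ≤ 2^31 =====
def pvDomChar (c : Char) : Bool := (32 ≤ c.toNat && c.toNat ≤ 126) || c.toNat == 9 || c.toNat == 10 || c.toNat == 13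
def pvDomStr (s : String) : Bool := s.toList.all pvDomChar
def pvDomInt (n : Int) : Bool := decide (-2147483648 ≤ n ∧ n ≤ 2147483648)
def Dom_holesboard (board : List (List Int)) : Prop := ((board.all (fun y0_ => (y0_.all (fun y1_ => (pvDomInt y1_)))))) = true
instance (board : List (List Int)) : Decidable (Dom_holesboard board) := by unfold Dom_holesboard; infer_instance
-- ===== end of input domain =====

-- B replaces A's running block_in_col flag with a two-phase per-column scan
-- (find topmost block, then collect empties below); alternative decomposition, same cost.


-- ===== PORT A =====
-- board[y][x] is ported as getD with default 0; inside Pre_ every index is in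
-- range, so this is exact there (outside Pre_ Python raises IndexError).
def holesboard (board : List (List Int)) : List (Int × Int) :=
  ((List.range (board.headD []).length).foldl
    (fun (holes : List (Int × Int)) (x : Nat) =>
      ((List.range board.length).foldl
        (fun (st : List (Int × Int) × Bool) (y : Nat) =>
          if st.2 && decide ((board.getD y []).getD x 0 = 0) then
            (st.1 ++ [((x : Int), (y : Int))], st.2)
          else if (board.getD y []).getD x 0 ≠ 0 then (st.1, true)
          else st)
        (holes, false)).1)
    [])

-- ===== PORT B =====
def holesboard_alt (board : List (List Int)) : List (Int × Int) :=
  ((List.range (board.headD []).length).foldl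
    (fun (holes : List (Int × Int)) (x : Nat) =>
      match (List.range board.length).find?
          (fun y => decide ((board.getD y []).getD x 0 ≠ 0)) with
      | none => holes
      | some i =>
          (List.range' (i + 1) (board.length - (i + 1))).foldl
            (fun (hs : List (Int × Int)) (y : Nat) =>
              if (board.getD y []).getD x 0 = 0 then hs ++ [((x : Int), (y : Int))]
              else hs)
            holes)
    [])

-- ===== PRECONDITION & SPEC =====
-- Pre_ excludes exactly the inputs where Python A raises IndexError: the empty
-- board (board[0]) and ragged boards with a row shorter than row 0.
def Pre_holesboard (board : List (List Int)) : Prop :=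
  board ≠ [] ∧ ∀ row ∈ board, (board.headD []).length ≤ row.length
instance (board : List (List Int)) : Decidable (Pre_holesboard board) := by
  unfold Pre_holesboard; infer_instance
def pvWitness_holesboard : List (List Int) := [[0, 1], [2, 0], [0, 0]]
def Spec_holesboard (board : List (List Int)) (out : List (Int × Int)) : Prop := out = holesboard_alt board
instance (board : List (List Int)) (out : List (Int × Int)) : Decidable (Spec_holesboard board out) := by unfold Spec_holesboard; infer_instance

-- ===== CLAIM (what is proved, stated in full; the proofs are below) =====
def Claim_equal_holesboard : Prop := ∀ (board : List (List Int)), Dom_holesboard board → Pre_holesboard board → Spec_holesboard board (holesboard board)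

-- ===== LEMMAS AND PROOFS =====

-- Named versions (definitionally equal) of the two ports' loop bodies.
def stepA (f : Nat → Int) (x : Nat) (st : List (Int × Int) × Bool) (y : Nat) :
    List (Int × Int) × Bool :=
  if st.2 && decide (f y = 0) then (st.1 ++ [((x : Int), (y : Int))], st.2)
  else if f y ≠ 0 then (st.1, true)
  else st

def stepB (f : Nat → Int) (x : Nat) (hs : List (Int × Int)) (y : Nat) :
    List (Int × Int) :=
  if f y = 0 then hs ++ [((x : Int), (y : Int))] else hs

-- Once the flag is true, A's inner fold just appends the empty cells.
theorem aux_flag_true (f : Nat → Int) (x : Nat) (ys : List Nat) (hs : List (Int × Int)) :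
    ys.foldl (stepA f x) (hs, true) = (ys.foldl (stepB f x) hs, true) := by
  induction ys generalizing hs with
  | nil => rfl
  | cons y ys ih =>
    by_cases h : f y = 0
    · have h1 : stepA f x (hs, true) y = (hs ++ [((x : Int), (y : Int))], true) := by
        simp [stepA, h]
      have h2 : stepB f x hs y = hs ++ [((x : Int), (y : Int))] := by simp [stepB, h]
      rw [List.foldl_cons, List.foldl_cons, h1, h2, ih]
    · have h1 : stepA f x (hs, true) y = (hs, true) := by simp [stepA, h]
      have h2 : stepB f x hs y = hs := by simp [stepB, h]
      rw [List.foldl_cons, List.foldl_cons, h1, h2, ih]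

-- A's inner column fold over range' a k (flag initially false) equals B's
-- two-phase "find first block, then collect the empties after it".
theorem aux_col (f : Nat → Int) (x : Nat) (k a : Nat) (hs : List (Int × Int)) :
    ((List.range' a k).foldl (stepA f x) (hs, false)).1
    = (match (List.range' a k).find? (fun y => decide (f y ≠ 0)) with
       | none => hs
       | some i => (List.range' (i + 1) (a + k - (i + 1))).foldl (stepB f x) hs) := by
  induction k generalizing a hs with
  | zero => rfl
  | succ k ih =>
    rw [List.range'_succ, List.foldl_cons]
    by_cases h : f a = 0
    · have h1 : stepA f x (hs, false) a = (hs, false) := by simp [stepA, h]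
      have h2 : (a :: List.range' (a + 1) k).find? (fun y => decide (f y ≠ 0))
          = (List.range' (a + 1) k).find? (fun y => decide (f y ≠ 0)) := by
        apply List.find?_cons_of_neg; simp [h]
      rw [h1, h2, ih (a + 1) hs]
      have harith : a + 1 + k = a + (k + 1) := by omega
      rw [harith]
    · have h1 : stepA f x (hs, false) a = (hs, true) := by simp [stepA, h]
      have h2 : (a :: List.range' (a + 1) k).find? (fun y => decide (f y ≠ 0))
          = some a := by apply List.find?_cons_of_pos; simp [h]
      have harith : a + (k + 1) - (a + 1) = k := by omega
      rw [h1, h2, aux_flag_true]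
      simp [harith]

-- ===== VERDICT (by name: the statement is the Claim_ definition above) =====
theorem holesboard_spec : Claim_equal_holesboard := by
  intro board _ _
  unfold Spec_holesboard holesboard holesboard_alt
  apply List.foldl_ext
  intro holes x _
  show ((List.range board.length).foldl
      (stepA (fun y => (board.getD y []).getD x 0) x) (holes, false)).1 = _
  rw [List.range_eq_range',
    aux_col (fun y => (board.getD y []).getD x 0) x board.length 0 holes]
  rw [← List.range_eq_range']
  unfold stepB
  simp only [Nat.zero_add]
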